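/- GENERATED by farm/mkstatement.py from design/units.tsv (unit `DGifGetRecordType.E`) and the assertions of Gif/Spec/Seg_DGifGetRecordType.lean — do not edit.
   THE STATEMENT of the proof unit `DGifGetRecordType.E`: segment E of `DGifGetRecordType` (8 instructions; entries 0x108bf5;
   exits ret; ranges 0x108bf5-0x108c0e)
   takes each of its entry assertions to one of its exit assertions (`Gif.Spec.DGifGetRecordType.SegE`), given the contracts of its callees.
   What the names mean: ProgX/Base/Spec/Basic.lean (the shared hypotheses), Gif/Spec/Seg_DGifGetRecordType.lean (the assertions). The theorem to prove:
   `theorem DGifGetRecordType_E_ok : Gif.Spec.DGifGetRecordType_E.Statement`. -/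
import Gif.Code
import Gif.Dec.All
import Gif.Labels
import Gif.Spec.Seg_DGifGetRecordType
namespace Gif.Spec.DGifGetRecordType_E
open X86 X86.User Asan

/-- The statement of unit `DGifGetRecordType.E`. -/
def Statement : Prop :=
  ∀ (Lay : Layout) (_hLay : Lay.hi = 0x1000000) (μ : Microarch) (_hμ : UserX.MicroOK μ) (u₀ : State)
    (_hcode : HasCodeNat Lay u₀ Gif.L.DGifGetRecordType.entry Gif.Code.code_DGifGetRecordType.nat Gif.L.DGifGetRecordType.size),
    Gif.Spec.DGifGetRecordType.SegE Lay μ u₀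

end Gif.Spec.DGifGetRecordType_E
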